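-- pv_equiv track=rewrite | github.com/JoshuaAyala/ProyectoFinalEstructuradeDatosIPython | packages/deBusqueda.py | buscarClave
-- ===== SOURCE A (Python) =====
-- def toASCII(dato):
--   clave = 0
--   x=0
--   for i in dato:
--     x+=1
--     clave+=(ord(i)*x)
--
--   return clave
--
-- def buscarClave(clave, lista, largo):
--   encontrado = False
--   for i in range(0, largo):
--     if(toASCII(lista[i])==clave):
--       encontrado = True
--       return "El elemento se ha encontrado en el indice ", i+1
--     elif(i==largo and encontrado != True):
--       return "El elemento no se encontró"
-- ===== SOURCE B (Python) =====
-- def toASCII(dato):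
--     return sum(ord(c) * (i + 1) for i, c in enumerate(dato))
--
-- def buscarClave(clave, lista, largo):
--     claves = [toASCII(lista[i]) for i in range(largo)]
--     if clave in claves:
--         return "El elemento se ha encontrado en el indice ", claves.index(clave) + 1
--     return None
-- ===== Notes on version B (the rewrite author's own statement) =====
-- stated objective: alternative
-- what changed: B first builds the full table of weighted keys for the consulted prefix (with toASCII rewritten as a sum over enumerate), then answers with a membership test plus a single index lookup, instead of A's early-return scan with its dead elif branch and unused flag.
-- outside the precondition, e.g. on buscarClave(0, [''], 2): A returns ('El elemento se ha encontrado en el indice ', 1), B raises IndexError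
import Mathlib
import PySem

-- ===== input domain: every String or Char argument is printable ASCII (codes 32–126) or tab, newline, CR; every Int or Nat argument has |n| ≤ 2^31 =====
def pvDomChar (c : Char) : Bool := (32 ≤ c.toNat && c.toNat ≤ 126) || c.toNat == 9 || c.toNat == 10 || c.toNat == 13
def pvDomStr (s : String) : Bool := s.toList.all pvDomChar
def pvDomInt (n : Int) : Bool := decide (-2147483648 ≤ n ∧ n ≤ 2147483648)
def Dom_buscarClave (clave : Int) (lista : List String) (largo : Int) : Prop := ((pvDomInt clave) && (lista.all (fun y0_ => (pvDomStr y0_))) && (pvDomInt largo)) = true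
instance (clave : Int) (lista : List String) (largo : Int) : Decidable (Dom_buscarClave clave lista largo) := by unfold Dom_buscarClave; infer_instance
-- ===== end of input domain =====

-- B replaces A's early-return scan (with dead elif branch and unused flag) by a key-table
-- build followed by a membership test and one index lookup; same cost, plainer shape.

-- ===== PORT A =====
-- toASCII: clave = 0; x = 0; for i in dato: x += 1; clave += ord(i)*x
def toASCII (dato : String) : Int :=
  (dato.toList.foldl (fun (st : Int × Int) c => (st.1 + (c.toNat : Int) * (st.2 + 1), st.2 + 1)) (0, 0)).1

-- the for-loop of buscarClave over the (remaining) indices of range(0, largo)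
def buscarClaveGo (clave : Int) (lista : List String) (largo : Int) (encontrado : Bool) : List Int → Option (String × Int)
  | [] => none                        -- loop ends, function falls through: Python returns None
  | i :: rest =>
    match PySem.List.pyGet? lista i with
    | none => none                    -- lista[i] raises IndexError; excluded by Pre_buscarClave
    | some s =>
      if toASCII s == clave then
        some ("El elemento se ha encontrado en el indice ", i + 1)
      else if i == largo && !encontrado then
        none                          -- Python returns a bare string (not a tuple) here; unreachable since i < largo
      else
        buscarClaveGo clave lista largo encontrado rest

def buscarClave (clave : Int) (lista : List String) (largo : Int) : Option (String × Int) :=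
  buscarClaveGo clave lista largo false (PySem.List.pyRange 0 largo 1)

-- ===== PORT B =====
-- toASCII: sum(ord(c) * (i + 1) for i, c in enumerate(dato))
def toASCII_alt (dato : String) : Int :=
  ((PySem.List.enumerate dato.toList 0).map (fun p => (p.2.toNat : Int) * (p.1 + 1))).sum

def buscarClave_alt (clave : Int) (lista : List String) (largo : Int) : Option (String × Int) :=
  let claves := (PySem.List.pyRange 0 largo 1).map
    (fun i => toASCII_alt ((PySem.List.pyGet? lista i).getD ""))   -- lista[i]; in range under Pre_
  if clave ∈ claves then
    match PySem.List.index? claves clave with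
    | some j => some ("El elemento se ha encontrado en el indice ", (j : Int) + 1)
    | none => none                    -- unreachable: clave ∈ claves
  else none

-- ===== PRECONDITION & SPEC =====
-- Pre_ excludes largo > len(lista): there lista[i] raises IndexError; A's early-return scan may
-- still return when a match precedes the out-of-range index, but B's table build raises first.
def Pre_buscarClave (clave : Int) (lista : List String) (largo : Int) : Prop :=
  largo ≤ (lista.length : Int)
instance (clave : Int) (lista : List String) (largo : Int) : Decidable (Pre_buscarClave clave lista largo) := by unfold Pre_buscarClave; infer_instance

def pvWitness_buscarClave : Int × List String × Int := (293, ["ab", "c"], 2)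

def Spec_buscarClave (clave : Int) (lista : List String) (largo : Int) (out : Option (String × Int)) : Prop := out = buscarClave_alt clave lista largo
instance (clave : Int) (lista : List String) (largo : Int) (out : Option (String × Int)) : Decidable (Spec_buscarClave clave lista largo out) := by unfold Spec_buscarClave; infer_instance

-- ===== CLAIM (what is proved, stated in full; the proofs are below) =====
def Claim_equal_buscarClave : Prop := ∀ (clave : Int) (lista : List String) (largo : Int), Dom_buscarClave clave lista largo → Pre_buscarClave clave lista largo → Spec_buscarClave clave lista largo (buscarClave clave lista largo)

-- ===== LEMMAS AND PROOFS =====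

-- A's char fold from an arbitrary state equals acc + B's enumerate-weighted sum started at x.
lemma toASCII_go (l : List Char) : ∀ (acc x : Int),
    (l.foldl (fun (st : Int × Int) c => (st.1 + (c.toNat : Int) * (st.2 + 1), st.2 + 1)) (acc, x)).1
      = acc + ((PySem.List.enumerate l x).map (fun p => (p.2.toNat : Int) * (p.1 + 1))).sum := by
  induction l with
  | nil => intro acc x; simp [PySem.List.enumerate_nil]
  | cons c rest ih =>
    intro acc x
    simp only [List.foldl_cons, PySem.List.enumerate_cons, List.map_cons, List.sum_cons, ih]
    ring

lemma toASCII_eq (dato : String) : toASCII dato = toASCII_alt dato := by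
  simp [toASCII, toASCII_alt, toASCII_go]

-- main loop lemma: A's scan over range(a, largo) equals index? on B's key table over the same range
lemma go_eq (clave : Int) (lista : List String) (largo : Int)
    (hlen : largo ≤ (lista.length : Int)) :
    ∀ (a : Int), 0 ≤ a →
      buscarClaveGo clave lista largo false (PySem.List.pyRange a largo 1)
        = match PySem.List.index?
            ((PySem.List.pyRange a largo 1).map
              (fun i => toASCII_alt ((PySem.List.pyGet? lista i).getD ""))) clave with
          | some j => some ("El elemento se ha encontrado en el indice ", a + j + 1)
          | none => none := by
  intro a ha
  by_cases hab : largo ≤ a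
  · rw [PySem.List.pyRange_one_eq_nil hab]
    simp [buscarClaveGo, PySem.List.index?_eq_idxOf?, List.idxOf?]
  · have hab' : a < largo := by omega
    have hterm : ((largo - (a + 1)).toNat) < ((largo - a).toNat) := by omega
    rw [PySem.List.pyRange_one_cons hab']
    have hget : PySem.List.pyGet? lista a = some (lista[a.toNat]'(by omega)) :=
      PySem.List.pyGet?_eq_some_getElem lista ha (hab'.trans_le hlen)
    simp only [buscarClaveGo, hget, List.map_cons, Option.getD_some]
    by_cases hmatch : toASCII_alt (lista[a.toNat]'(by omega)) = clave
    · have hA : (toASCII (lista[a.toNat]'(by omega)) == clave) = true := by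
        simp [toASCII_eq, hmatch]
      rw [hA, hmatch, PySem.List.index?_cons_self]
      norm_num
    · have hA : (toASCII (lista[a.toNat]'(by omega)) == clave) = false := by
        simp [toASCII_eq, hmatch]
      have hne : (a == largo) = false := by simp; omega
      rw [hA, PySem.List.index?_cons_of_ne _ hmatch]
      simp only [Bool.false_eq_true, if_false, Bool.not_false, Bool.and_true, hne]
      rw [go_eq clave lista largo hlen (a + 1) (by omega)]
      cases PySem.List.index?
          ((PySem.List.pyRange (a + 1) largo 1).map
            (fun i => toASCII_alt ((PySem.List.pyGet? lista i).getD ""))) clave with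
      | none => simp
      | some j => simp; ring
termination_by a => ((largo - a).toNat)
decreasing_by exact hterm

-- ===== VERDICT (by name: the statement is the Claim_ definition above) =====
theorem buscarClave_spec : Claim_equal_buscarClave := by
  intro clave lista largo _ hpre
  unfold Spec_buscarClave buscarClave buscarClave_alt
  dsimp only
  rw [go_eq clave lista largo hpre 0 le_rfl]
  by_cases hmem : clave ∈ (PySem.List.pyRange 0 largo 1).map
      (fun i => toASCII_alt ((PySem.List.pyGet? lista i).getD ""))
  · obtain ⟨j, hj⟩ := Option.isSome_iff_exists.1 ((PySem.List.index?_isSome_iff _ clave).2 hmem)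
    rw [if_pos hmem, hj]
    norm_num
  · rw [if_neg hmem, (PySem.List.index?_eq_none_iff _ clave).2 hmem]
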